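-- pv_equiv track=rewrite | github.com/Chun-Bae/Baekjoon | Python/백준/Silver/19941. 햄버거 분배/햄버거 분배.py | max_people_eating_hamburgers
-- ===== SOURCE A (Python) =====
-- def max_people_eating_hamburgers(N, K, table):
--     people = []
--     hamburgers = []
--
--     for i in range(N):
--         if table[i] == 'P':
--             people.append(i)
--         elif table[i] == 'H':
--             hamburgers.append(i)
--
--     max_eaters = 0
--     h_idx = 0
--
--     for p in people:
--         while h_idx < len(hamburgers) and hamburgers[h_idx] < p - K:
--             h_idx += 1
--
--         if h_idx < len(hamburgers) and hamburgers[h_idx] <= p + K: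
--             max_eaters += 1
--             h_idx += 1
--
--     return max_eaters
-- ===== SOURCE B (Python) =====
-- def max_people_eating_hamburgers(N, K, table):
--     used = set()
--     count = 0
--     for i in range(N):
--         if table[i] == 'P':
--             for j in range(max(i - K, 0), min(i + K, N - 1) + 1):
--                 if table[j] == 'H' and j not in used:
--                     used.add(j)
--                     count += 1
--                     break
--     return count
-- ===== Notes on version B (the rewrite author's own statement) =====
-- stated objective: alternative
-- what changed: Replaces A's precomputed people/hamburger index lists with a monotone two-pointer by a single left-to-right pass over the table that, at each 'P', scans its window [i-K, i+K] for the first hamburger position not yet in a used-set.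
import Mathlib
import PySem

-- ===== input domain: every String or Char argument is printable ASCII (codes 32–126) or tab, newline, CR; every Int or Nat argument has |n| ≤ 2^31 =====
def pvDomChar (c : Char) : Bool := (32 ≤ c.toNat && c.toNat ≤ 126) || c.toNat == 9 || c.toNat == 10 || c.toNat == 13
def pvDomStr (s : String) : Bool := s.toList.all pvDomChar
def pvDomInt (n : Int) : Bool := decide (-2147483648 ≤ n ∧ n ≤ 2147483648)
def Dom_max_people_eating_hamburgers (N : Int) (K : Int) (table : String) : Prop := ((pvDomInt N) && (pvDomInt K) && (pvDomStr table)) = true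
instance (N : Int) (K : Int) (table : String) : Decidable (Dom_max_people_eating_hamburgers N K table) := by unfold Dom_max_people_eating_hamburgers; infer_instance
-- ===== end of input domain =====

-- B replaces A's two index lists + two-pointer with one pass over the table that, at each 'P',
-- scans the window [i-K, i+K] for the first hamburger not yet in a used-set (alternative, not faster).

-- ===== PORT A =====
-- the first for-loop of A: collect the people and hamburger indices
def pvBuild (table : String) (N : Int) : List Int × List Int :=
  (PySem.List.pyRange 0 N 1).foldl (fun acc i =>
    if PySem.Str.pyGet? table i = some 'P' then (acc.1 ++ [i], acc.2)
    else if PySem.Str.pyGet? table i = some 'H' then (acc.1, acc.2 ++ [i])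
    else acc) ([], [])

-- A's inner while-loop: advance h_idx while hamburgers[h_idx] < bound
def pvSkip (hs : List Int) (bound : Int) (h_idx : Nat) : Nat :=
  match hget : hs[h_idx]? with
  | some hb => if hb < bound then pvSkip hs bound (h_idx + 1) else h_idx
  | none => h_idx
termination_by hs.length - h_idx
decreasing_by
  have := (List.getElem?_eq_some_iff.mp hget).1
  omega

-- the body of A's loop over people
def pvStepA (hs : List Int) (K : Int) (st : Int × Nat) (p : Int) : Int × Nat :=
  match hs[pvSkip hs (p - K) st.2]? with
  | some hb => if hb ≤ p + K then (st.1 + 1, pvSkip hs (p - K) st.2 + 1)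
               else (st.1, pvSkip hs (p - K) st.2)
  | none => (st.1, pvSkip hs (p - K) st.2)

def max_people_eating_hamburgers (N : Int) (K : Int) (table : String) : Int :=
  let pb := pvBuild table N
  ((pb.1).foldl (pvStepA pb.2 K) (0, 0)).1

-- ===== PORT B =====
-- B's inner for/break: first j in [lo, hi) with table[j] == 'H' and j not in used
def pvFindH (table : String) (used : PySem.Set Int) (lo hi : Int) : Option Int :=
  (PySem.List.pyRange lo hi 1).find?
    (fun j => decide (PySem.Str.pyGet? table j = some 'H') && !(PySem.Set.contains used j))

-- the body of B's loop over positions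
def pvStepB (table : String) (N K : Int) (st : Int × PySem.Set Int) (i : Int) : Int × PySem.Set Int :=
  if PySem.Str.pyGet? table i = some 'P' then
    match pvFindH table st.2 (max (i - K) 0) (min (i + K) (N - 1) + 1) with
    | some j => (st.1 + 1, PySem.Set.add st.2 j)
    | none => st
  else st

def max_people_eating_hamburgers_alt (N : Int) (K : Int) (table : String) : Int :=
  ((PySem.List.pyRange 0 N 1).foldl (pvStepB table N K) (0, PySem.Set.empty)).1

-- ===== PRECONDITION & SPEC =====
-- Python A indexes table[i] for every i in range(N): it raises IndexError iff N > len(table).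
def Pre_max_people_eating_hamburgers (N : Int) (K : Int) (table : String) : Prop :=
  N ≤ (table.toList.length : Int)
instance (N : Int) (K : Int) (table : String) : Decidable (Pre_max_people_eating_hamburgers N K table) := by
  unfold Pre_max_people_eating_hamburgers; infer_instance

def pvWitness_max_people_eating_hamburgers : Int × Int × String := (3, 1, "PHP")

def Spec_max_people_eating_hamburgers (N : Int) (K : Int) (table : String) (out : Int) : Prop := out = max_people_eating_hamburgers_alt N K table
instance (N : Int) (K : Int) (table : String) (out : Int) : Decidable (Spec_max_people_eating_hamburgers N K table out) := by unfold Spec_max_people_eating_hamburgers; infer_instance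

-- ===== CLAIM (what is proved, stated in full; the proofs are below) =====
def Claim_equal_max_people_eating_hamburgers : Prop := ∀ (N : Int) (K : Int) (table : String), Dom_max_people_eating_hamburgers N K table → Pre_max_people_eating_hamburgers N K table → Spec_max_people_eating_hamburgers N K table (max_people_eating_hamburgers N K table)

-- ===== LEMMAS AND PROOFS =====

-- A's first loop builds exactly the filtered index lists
lemma pvBuild_fold_eq (table : String) (l : List Int) (acc : List Int × List Int) :
    l.foldl (fun acc i =>
      if PySem.Str.pyGet? table i = some 'P' then (acc.1 ++ [i], acc.2)
      else if PySem.Str.pyGet? table i = some 'H' then (acc.1, acc.2 ++ [i])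
      else acc) acc
    = (acc.1 ++ l.filter (fun i => decide (PySem.Str.pyGet? table i = some 'P')),
       acc.2 ++ l.filter (fun i => decide (PySem.Str.pyGet? table i = some 'H'))) := by
  induction l generalizing acc with
  | nil => simp
  | cons x l ih =>
    simp only [List.foldl_cons, List.filter_cons]
    by_cases hP : PySem.Str.pyGet? table x = some 'P'
    · have hH : ¬ PySem.Str.pyGet? table x = some 'H' := by rw [hP]; simp
      rw [if_pos hP, if_pos (by simpa using hP), if_neg (by simpa using hH), ih]
      simp
    · by_cases hH : PySem.Str.pyGet? table x = some 'H'
      · rw [if_neg hP, if_pos hH, if_neg (by simpa using hP), if_pos (by simpa using hH), ih]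
        simp
      · rw [if_neg hP, if_neg hH, if_neg (by simpa using hP), if_neg (by simpa using hH), ih]

lemma pvBuild_eq (table : String) (N : Int) :
    pvBuild table N
    = ((PySem.List.pyRange 0 N 1).filter (fun i => decide (PySem.Str.pyGet? table i = some 'P')),
       (PySem.List.pyRange 0 N 1).filter (fun i => decide (PySem.Str.pyGet? table i = some 'H'))) := by
  unfold pvBuild
  rw [pvBuild_fold_eq]
  simp

-- a fold whose step ignores elements failing p can be restricted to the filtered list
lemma pvFoldl_filter {α β : Type} (f : β → α → β) (p : α → Bool)
    (hf : ∀ b a, p a = false → f b a = b) :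
    ∀ (l : List α) (b : β), l.foldl f b = (l.filter p).foldl f b := by
  intro l
  induction l with
  | nil => intro b; simp
  | cons x l ih =>
    intro b
    by_cases hx : p x = true
    · simp [hx, ih]
    · have hx' : p x = false := by revert hx; cases p x <;> simp
      simp [hx', hf b x hx', ih]

-- pvSkip: basic facts of A's while loop
lemma pvSkip_le (hs : List Int) (bound : Int) (i : Nat) : i ≤ pvSkip hs bound i := by
  fun_induction pvSkip hs bound i with
  | case1 i hb hget hlt ih => omega
  | case2 => omega
  | case3 => omega

lemma pvSkip_mid (hs : List Int) (bound : Int) (i : Nat) :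
    ∀ k, i ≤ k → k < pvSkip hs bound i → ∃ hk : k < hs.length, hs[k] < bound := by
  fun_induction pvSkip hs bound i with
  | case1 i hb hget hlt ih =>
    intro k hik hk
    by_cases hk' : k = i
    · subst hk'
      have := List.getElem?_eq_some_iff.mp hget
      exact ⟨this.1, by rw [this.2]; exact hlt⟩
    · exact ih k (by omega) hk
  | case2 i hb hget hlt => intro k h1 h2; omega
  | case3 i hget => intro k h1 h2; omega

lemma pvSkip_stop (hs : List Int) (bound : Int) (i : Nat) {hb : Int}
    (h : hs[pvSkip hs bound i]? = some hb) : ¬ hb < bound := by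
  fun_induction pvSkip hs bound i with
  | case1 i hb' hget hlt ih => exact ih h
  | case2 i hb' hget hlt =>
    rw [hget] at h
    cases h
    exact hlt
  | case3 i hget =>
    rw [hget] at h
    cases h

-- find? over an increasing integer range: success at the least satisfying element
lemma pvFind_pyRange_some_aux (p : Int → Bool) (hi j : Int) :
    ∀ (n : Nat) (lo : Int), (hi - lo).toNat = n → lo ≤ j → j < hi → p j = true →
    (∀ x, lo ≤ x → x < j → p x = false) →
    (PySem.List.pyRange lo hi 1).find? p = some j := by
  intro n
  induction n with
  | zero => intro lo hfuel h1 h2 hp hmin; omega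
  | succ n ih =>
    intro lo hfuel h1 h2 hp hmin
    rw [PySem.List.pyRange_one_cons (by omega)]
    by_cases hlo : lo = j
    · subst hlo
      simp [hp]
    · have hplo : p lo = false := hmin lo le_rfl (by omega)
      rw [List.find?_cons, hplo]
      exact ih (lo + 1) (by omega) (by omega) h2 hp (fun x hx1 hx2 => hmin x (by omega) hx2)

lemma pvFind_pyRange_some (p : Int → Bool) (lo hi j : Int)
    (h1 : lo ≤ j) (h2 : j < hi) (hp : p j = true)
    (hmin : ∀ x, lo ≤ x → x < j → p x = false) :
    (PySem.List.pyRange lo hi 1).find? p = some j :=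
  pvFind_pyRange_some_aux p hi j (hi - lo).toNat lo rfl h1 h2 hp hmin

lemma pvFind_pyRange_none (p : Int → Bool) (lo hi : Int)
    (h : ∀ x, lo ≤ x → x < hi → p x = false) :
    (PySem.List.pyRange lo hi 1).find? p = none := by
  rw [List.find?_eq_none]
  intro x hx
  rw [PySem.List.mem_pyRange_one] at hx
  simp [h x hx.1 hx.2]

-- the main simulation: A's (count, pointer) state and B's (count, used-set) state produce the
-- same count on a sorted list of 'P' positions
lemma pvMain (table : String) (N K : Int) (hs : List Int)
    (hchar : ∀ j : Int, j ∈ hs ↔ (0 ≤ j ∧ j < N ∧ PySem.Str.pyGet? table j = some 'H'))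
    (hsorted : hs.Pairwise (· < ·)) :
    ∀ (ps : List Int) (cnt : Int) (h_idx : Nat) (used : PySem.Set Int) (low : Int),
    (∀ p ∈ ps, PySem.Str.pyGet? table p = some 'P' ∧ 0 ≤ p ∧ p < N ∧ low ≤ p - K) →
    ps.Pairwise (· ≤ ·) →
    (∀ k, k < h_idx → ∀ hk : k < hs.length, hs[k] ∈ used ∨ hs[k] < low) →
    (∀ x ∈ used, ∃ k, ∃ hk : k < hs.length, k < h_idx ∧ hs[k] = x) →
    (ps.foldl (pvStepA hs K) (cnt, h_idx)).1
      = (ps.foldl (pvStepB table N K) (cnt, used)).1 := by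
  have hgetmono : ∀ (a b : Nat) (ha : a < hs.length) (hb : b < hs.length), a < b →
      hs[a] < hs[b] := fun a b ha hb hab => List.pairwise_iff_getElem.mp hsorted a b ha hb hab
  intro ps
  induction ps with
  | nil => intro cnt h_idx used low _ _ _ _; rfl
  | cons p ps ih =>
    intro cnt h_idx used low hps hsort hia hib
    obtain ⟨hPp, hp0, hpN, hplow⟩ := hps p (List.mem_cons_self ..)
    have hsort' : ps.Pairwise (· ≤ ·) := (List.pairwise_cons.mp hsort).2
    have hple : ∀ p' ∈ ps, p ≤ p' := (List.pairwise_cons.mp hsort).1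
    set h2 := pvSkip hs (p - K) h_idx with hh2
    have hle : h_idx ≤ h2 := pvSkip_le hs (p - K) h_idx
    have hmid : ∀ k, h_idx ≤ k → k < h2 → ∃ hk : k < hs.length, hs[k] < p - K :=
      pvSkip_mid hs (p - K) h_idx
    -- no available hamburger at a list index below h2 can lie in the window
    have hno : ∀ x : Int, p - K ≤ x → x ∈ hs → ¬ x ∈ used →
        ∀ kx, ∀ hkx : kx < hs.length, hs[kx] = x → h2 ≤ kx := by
      intro x hxlow hxhs hxused kx hkx hkx2
      by_contra hcon
      rw [Nat.not_le] at hcon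
      by_cases hk1 : kx < h_idx
      · rcases hia kx hk1 hkx with hu | hl
        · rw [hkx2] at hu; exact hxused hu
        · rw [hkx2] at hl; omega
      · obtain ⟨_, hlt⟩ := hmid kx (by omega) hcon
        rw [hkx2] at hlt; omega
    simp only [List.foldl_cons]
    -- a window member with a true predicate sits in hs at an index ≥ h2
    have hwin : ∀ x : Int, max (p - K) 0 ≤ x → x < min (p + K) (N - 1) + 1 →
        (decide (PySem.Str.pyGet? table x = some 'H') && !(PySem.Set.contains used x)) = true →
        ∃ kx, ∃ hkx : kx < hs.length, hs[kx]? = some x ∧ h2 ≤ kx := by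
      intro x hx1 hx2 hx3
      simp only [Bool.and_eq_true, decide_eq_true_eq, Bool.not_eq_eq_eq_not, Bool.not_true,
        PySem.Set.contains_eq_listContains] at hx3
      obtain ⟨hxH, hxc⟩ := hx3
      have hxused : ¬ x ∈ used := by
        intro hmem
        rw [List.contains_eq_mem] at hxc
        simp [hmem] at hxc
      have hxhs : x ∈ hs := (hchar x).mpr ⟨by omega, by omega, hxH⟩
      obtain ⟨kx, hkx, hkx2⟩ := List.mem_iff_getElem.mp hxhs
      exact ⟨kx, hkx, List.getElem?_eq_some_iff.mpr ⟨hkx, hkx2⟩,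
        hno x (by omega) hxhs hxused kx hkx hkx2⟩
    cases hget : hs[h2]? with
    | some hb =>
      have hh2len : h2 < hs.length := (List.getElem?_eq_some_iff.mp hget).1
      have hbval : hs[h2] = hb := (List.getElem?_eq_some_iff.mp hget).2
      have hbmem : hb ∈ hs := hbval ▸ List.getElem_mem hh2len
      obtain ⟨hb0, hbN, hbH⟩ := (hchar hb).mp hbmem
      have hbstop : ¬ hb < p - K := pvSkip_stop hs (p - K) h_idx (hh2 ▸ hget)
      -- anything found at an index ≥ h2 is ≥ hb
      have hble : ∀ (x : Int) (kx : Nat), kx < hs.length → hs[kx]? = some x → h2 ≤ kx →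
          hb ≤ x := by
        intro x kx hkx hopt hkge
        rcases Nat.eq_or_lt_of_le hkge with h | h
        · rw [← h, hget] at hopt
          cases hopt
          exact le_rfl
        · have hlt := hgetmono h2 kx hh2len hkx h
          have hx : hs[kx] = x := (List.getElem?_eq_some_iff.mp hopt).2
          rw [hbval, hx] at hlt
          omega
      have hbused : ¬ hb ∈ used := by
        intro hmem
        obtain ⟨k, hk, hklt, hkeq⟩ := hib hb hmem
        have := hgetmono k h2 hk hh2len (by omega)
        rw [hkeq, hbval] at this
        omega
      by_cases hbwin : hb ≤ p + K
      · -- A matches hb; B finds exactly hb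
        have hfind : pvFindH table used (max (p - K) 0) (min (p + K) (N - 1) + 1) = some hb := by
          unfold pvFindH
          apply pvFind_pyRange_some _ _ _ hb (by omega) (by omega)
          · simp only [Bool.and_eq_true, decide_eq_true_eq, Bool.not_eq_eq_eq_not, Bool.not_true,
              PySem.Set.contains_eq_listContains]
            refine ⟨hbH, ?_⟩
            rw [List.contains_eq_mem]
            simp [hbused]
          · intro x hx1 hx2
            by_contra hxc
            rw [Bool.not_eq_false] at hxc
            obtain ⟨kx, hkx, hopt, hkge⟩ := hwin x hx1 (by omega) hxc
            have := hble x kx hkx hopt hkge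
            omega
        have hA : pvStepA hs K (cnt, h_idx) p = (cnt + 1, h2 + 1) := by
          unfold pvStepA
          rw [← hh2, hget]
          simp [hbwin]
        have hB : pvStepB table N K (cnt, used) p = (cnt + 1, PySem.Set.add used hb) := by
          unfold pvStepB
          rw [if_pos hPp, hfind]
        rw [hA, hB]
        apply ih (cnt + 1) (h2 + 1) (PySem.Set.add used hb) (p - K)
        · intro p' hp'
          obtain ⟨h1, h2', h3, _⟩ := hps p' (List.mem_cons_of_mem _ hp')
          exact ⟨h1, h2', h3, by have := hple p' hp'; omega⟩
        · exact hsort'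
        · intro k hk hklen
          by_cases hk1 : k < h_idx
          · rcases hia k hk1 hklen with hu | hl
            · exact Or.inl ((PySem.Set.mem_add _ _ _).mpr (Or.inl hu))
            · exact Or.inr (by omega)
          · by_cases hk2 : k < h2
            · obtain ⟨_, hlt⟩ := hmid k (by omega) hk2
              exact Or.inr hlt
            · have hkh2 : k = h2 := by omega
              subst hkh2
              exact Or.inl ((PySem.Set.mem_add _ _ _).mpr (Or.inr hbval))
        · intro x hx
          rcases (PySem.Set.mem_add _ _ _).mp hx with hx | hx
          · obtain ⟨k, hk, hklt, hkeq⟩ := hib x hx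
            exact ⟨k, hk, by omega, hkeq⟩
          · exact ⟨h2, hh2len, by omega, by rw [hbval, hx]⟩
      · -- hb is beyond the window: neither side matches
        have hfind : pvFindH table used (max (p - K) 0) (min (p + K) (N - 1) + 1) = none := by
          unfold pvFindH
          apply pvFind_pyRange_none
          intro x hx1 hx2
          by_contra hxc
          rw [Bool.not_eq_false] at hxc
          obtain ⟨kx, hkx, hopt, hkge⟩ := hwin x hx1 hx2 hxc
          have := hble x kx hkx hopt hkge
          omega
        have hA : pvStepA hs K (cnt, h_idx) p = (cnt, h2) := by
          unfold pvStepA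
          rw [← hh2, hget]
          simp [hbwin]
        have hB : pvStepB table N K (cnt, used) p = (cnt, used) := by
          unfold pvStepB
          rw [if_pos hPp, hfind]
        rw [hA, hB]
        apply ih cnt h2 used (p - K)
        · intro p' hp'
          obtain ⟨h1, h2', h3, _⟩ := hps p' (List.mem_cons_of_mem _ hp')
          exact ⟨h1, h2', h3, by have := hple p' hp'; omega⟩
        · exact hsort'
        · intro k hk hklen
          by_cases hk1 : k < h_idx
          · rcases hia k hk1 hklen with hu | hl
            · exact Or.inl hu
            · exact Or.inr (by omega)
          · obtain ⟨_, hlt⟩ := hmid k (by omega) hk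
            exact Or.inr hlt
        · intro x hx
          obtain ⟨k, hk, hklt, hkeq⟩ := hib x hx
          exact ⟨k, hk, by omega, hkeq⟩
    | none =>
      have hh2len : hs.length ≤ h2 := List.getElem?_eq_none_iff.mp hget
      have hfind : pvFindH table used (max (p - K) 0) (min (p + K) (N - 1) + 1) = none := by
        unfold pvFindH
        apply pvFind_pyRange_none
        intro x hx1 hx2
        by_contra hxc
        rw [Bool.not_eq_false] at hxc
        obtain ⟨kx, hkx, _, hkge⟩ := hwin x hx1 hx2 hxc
        omega
      have hA : pvStepA hs K (cnt, h_idx) p = (cnt, h2) := by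
        unfold pvStepA
        rw [← hh2, hget]
      have hB : pvStepB table N K (cnt, used) p = (cnt, used) := by
        unfold pvStepB
        rw [if_pos hPp, hfind]
      rw [hA, hB]
      apply ih cnt h2 used (p - K)
      · intro p' hp'
        obtain ⟨h1, h2', h3, _⟩ := hps p' (List.mem_cons_of_mem _ hp')
        exact ⟨h1, h2', h3, by have := hple p' hp'; omega⟩
      · exact hsort'
      · intro k hk hklen
        by_cases hk1 : k < h_idx
        · rcases hia k hk1 hklen with hu | hl
          · exact Or.inl hu
          · exact Or.inr (by omega)
        · obtain ⟨_, hlt⟩ := hmid k (by omega) hk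
          exact Or.inr hlt
      · intro x hx
        obtain ⟨k, hk, hklt, hkeq⟩ := hib x hx
        exact ⟨k, hk, by omega, hkeq⟩

-- ===== VERDICT (by name: the statement is the Claim_ definition above) =====
theorem max_people_eating_hamburgers_spec : Claim_equal_max_people_eating_hamburgers := by
  intro N K table _ _
  unfold Spec_max_people_eating_hamburgers
  unfold max_people_eating_hamburgers max_people_eating_hamburgers_alt
  rw [pvBuild_eq]
  rw [pvFoldl_filter (pvStepB table N K) (fun i => decide (PySem.Str.pyGet? table i = some 'P'))
    (by
      intro st i hfalse
      unfold pvStepB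
      rw [if_neg (by simpa using hfalse)])]
  refine pvMain table N K _ ?_ ?_ _ 0 0 PySem.Set.empty (-K) ?_ ?_ ?_ ?_
  · intro j
    simp [List.mem_filter, PySem.List.mem_pyRange_one, and_assoc]
  · exact (PySem.List.pairwise_lt_pyRange_one 0 N).filter _
  · intro p hp
    rw [List.mem_filter, PySem.List.mem_pyRange_one] at hp
    obtain ⟨⟨h0, hN⟩, hP⟩ := hp
    exact ⟨by simpa using hP, h0, hN, by omega⟩
  · exact (((PySem.List.pairwise_lt_pyRange_one 0 N).filter _).imp le_of_lt)
  · intro k hk hklen; omega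
  · intro x hx; cases hx
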